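-- pv_equiv track=rewrite | github.com/mdariusz/logia | Rozwiazania/z00_wagi_napisow.py | waga_slowa
-- ===== SOURCE A (Python) =====
-- def waga_slowa(slowo):
--     dlugosc_slowa = len(slowo)
--     waga_slowa = 0
--     for i in range(dlugosc_slowa // 2):
--         waga_slowa += (i + 1) * 2
--     if dlugosc_slowa % 2 == 1:
--          waga_slowa += (dlugosc_slowa // 2) + 1
--
--     for litera in slowo:
--         if litera in "aeiouy":
--             waga_slowa -= 1
--         else:
--             waga_slowa += 1
--
--     return waga_slowa
-- ===== SOURCE B (Python) =====
-- def waga_slowa(slowo):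
--     n = len(slowo)
--     m = n // 2
--     base = m * (m + 1) + (m + 1 if n % 2 == 1 else 0)
--     vowels = sum(1 for c in slowo if c in "aeiouy")
--     return base + n - 2 * vowels
-- ===== Notes on version B (the rewrite author's own statement) =====
-- stated objective: simpler
-- what changed: The triangular accumulation loop is replaced by its closed form m*(m+1) (+m+1 for odd length), and the per-letter +/-1 loop by arithmetic on a single vowel count: base + len - 2*vowels.
import Mathlib
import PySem

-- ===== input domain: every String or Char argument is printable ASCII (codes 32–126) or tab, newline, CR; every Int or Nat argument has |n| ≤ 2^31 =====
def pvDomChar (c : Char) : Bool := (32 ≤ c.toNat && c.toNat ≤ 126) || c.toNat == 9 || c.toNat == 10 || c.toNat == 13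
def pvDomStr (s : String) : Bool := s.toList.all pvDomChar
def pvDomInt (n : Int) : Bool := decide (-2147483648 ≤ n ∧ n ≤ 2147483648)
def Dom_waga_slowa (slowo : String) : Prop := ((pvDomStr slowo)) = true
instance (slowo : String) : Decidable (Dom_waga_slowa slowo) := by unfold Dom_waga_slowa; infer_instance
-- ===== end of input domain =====

-- B replaces the triangular-sum loop by its closed form and the per-letter ±1 loop by
-- arithmetic on a vowel count (objective: simpler).


-- ===== PORT A =====
def waga_slowa (slowo : String) : Int :=
  let dlugosc_slowa : Int := slowo.toList.length
  let w0 : Int := (PySem.List.pyRange 0 (PySem.Int.floordiv dlugosc_slowa 2) 1).foldl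
    (fun w i => w + (i + 1) * 2) 0
  let w1 : Int := if PySem.Int.mod dlugosc_slowa 2 == 1 then
      w0 + PySem.Int.floordiv dlugosc_slowa 2 + 1 else w0
  slowo.toList.foldl (fun w litera => if "aeiouy".toList.contains litera then w - 1 else w + 1) w1

-- ===== PORT B =====
def waga_slowa_alt (slowo : String) : Int :=
  let n : Int := slowo.toList.length
  let m : Int := PySem.Int.floordiv n 2
  let base : Int := m * (m + 1) + (if PySem.Int.mod n 2 == 1 then m + 1 else 0)
  let vowels : Int := (slowo.toList.countP (fun c => "aeiouy".toList.contains c) : Nat)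
  base + n - 2 * vowels

-- ===== PRECONDITION & SPEC =====
def Spec_waga_slowa (slowo : String) (out : Int) : Prop := out = waga_slowa_alt slowo
instance (slowo : String) (out : Int) : Decidable (Spec_waga_slowa slowo out) := by unfold Spec_waga_slowa; infer_instance

-- ===== CLAIM (what is proved, stated in full; the proofs are below) =====
def Claim_equal_waga_slowa : Prop := ∀ (slowo : String), Dom_waga_slowa slowo → Spec_waga_slowa slowo (waga_slowa slowo)

-- ===== LEMMAS AND PROOFS =====

-- the triangular loop in closed form
theorem pv_tri (k : Nat) (w : Int) :
    (PySem.List.pyRange 0 (k : Int) 1).foldl (fun w i => w + (i + 1) * 2) w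
      = w + (k : Int) * ((k : Int) + 1) := by
  induction k generalizing w with
  | zero => simp
  | succ k ih =>
    have h : ((k : Int) + 1) = ((k + 1 : Nat) : Int) := by push_cast; ring
    rw [← h, PySem.List.pyRange_one_succ_right (by positivity), List.foldl_append, ih]
    simp; ring

-- the ±1 letter loop in closed form
theorem pv_letters (l : List Char) (w : Int) :
    l.foldl (fun w c => if "aeiouy".toList.contains c then w - 1 else w + 1) w
      = w + l.length - 2 * (l.countP (fun c => "aeiouy".toList.contains c) : Nat) := by
  induction l generalizing w with
  | nil => simp
  | cons c t ih =>
    simp only [List.foldl_cons, List.countP_cons, List.length_cons]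
    by_cases h : "aeiouy".toList.contains c = true
    · rw [if_pos h, ih]; simp only [h, if_true]; push_cast; ring
    · rw [if_neg h, ih]; simp only [h]; push_cast; ring

theorem pv_fd (n : Nat) : PySem.Int.floordiv (n : Int) 2 = ((n / 2 : Nat) : Int) := by
  simp [PySem.Int.floordiv, Int.fdiv_eq_ediv]

-- ===== VERDICT (by name: the statement is the Claim_ definition above) =====
theorem waga_slowa_spec : Claim_equal_waga_slowa := by
  intro slowo _
  unfold Spec_waga_slowa waga_slowa waga_slowa_alt
  simp only [pv_fd, pv_tri, pv_letters]
  split_ifs <;> push_cast <;> ring
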